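-- pv_equiv track=rewrite | github.com/jonasson2/randompack | misc/ziggurat-work/gen_zig_D.py | emit_array
-- ===== SOURCE A (Python) =====
-- def emit_array(name, ctype, width, suffix, vals):
--   lines = [f"static const {ctype} {name}[] = {{\n"]
--   for i in range(0, len(vals), 2):
--     if i + 1 < len(vals):
--       lines.append(
--         f"  0x{int(vals[i]):0{width}X}{suffix}, "
--         f"0x{int(vals[i + 1]):0{width}X}{suffix},\n"
--       )
--     else:
--       lines.append(f"  0x{int(vals[i]):0{width}X}{suffix},\n")
--   lines.append("};\n")
--   return "".join(lines)
-- ===== SOURCE B (Python) =====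
-- def emit_array(name, ctype, width, suffix, vals):
--   out = f"static const {ctype} {name}[] = {{\n"
--   for i, v in enumerate(vals):
--     out += "  " if i % 2 == 0 else ", "
--     out += f"0x{int(v):0{width}X}{suffix}"
--     if i % 2 == 1 or i == len(vals) - 1:
--       out += ",\n"
--   out += "};\n"
--   return out
-- ===== Notes on version B (the rewrite author's own statement) =====
-- stated objective: alternative
-- what changed: B replaces A's step-2 index loop that emits whole lines (with an even/odd branch over a lines list) by a single element-wise pass over enumerate(vals) working as a separator-driven state machine: the parity of the running index chooses the leading separator (' ' vs ', ') and decides where ',\n' is emitted, accumulating one flat string.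
import Mathlib
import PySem

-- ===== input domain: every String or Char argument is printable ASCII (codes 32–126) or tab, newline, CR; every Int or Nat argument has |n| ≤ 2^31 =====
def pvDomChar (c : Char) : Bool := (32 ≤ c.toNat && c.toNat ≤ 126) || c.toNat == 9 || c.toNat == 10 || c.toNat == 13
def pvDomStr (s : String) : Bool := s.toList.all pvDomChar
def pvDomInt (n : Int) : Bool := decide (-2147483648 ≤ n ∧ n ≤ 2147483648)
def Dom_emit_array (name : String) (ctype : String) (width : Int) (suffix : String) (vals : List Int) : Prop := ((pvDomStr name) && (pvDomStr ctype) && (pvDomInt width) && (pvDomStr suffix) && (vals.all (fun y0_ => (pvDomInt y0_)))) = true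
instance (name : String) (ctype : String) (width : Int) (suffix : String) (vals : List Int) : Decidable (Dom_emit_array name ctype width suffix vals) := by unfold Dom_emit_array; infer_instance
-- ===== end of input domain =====

-- B replaces A's step-2 index loop over whole lines by a separator-driven element-wise pass
-- over enumerate(vals): index parity chooses the separator and the line breaks (objective: alternative).

-- shared helper: Python's f"{v:0{width}X}" (uppercase hex, zero-padded after the sign);
-- both Python versions contain this same format expression, so both ports use this helper.
def pvHexDigit (n : Nat) : Char := if n < 10 then Char.ofNat (48 + n) else Char.ofNat (55 + n)

def pvHexChars (n : Nat) : List Char :=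
  if _h : n < 16 then [pvHexDigit n]
  else pvHexChars (n / 16) ++ [pvHexDigit (n % 16)]
decreasing_by exact Nat.div_lt_self (by omega) (by omega)

def pvFmtHex (v : Int) (width : Int) : List Char :=
  let sign : List Char := if v < 0 then ['-'] else []
  let digs := pvHexChars v.natAbs
  sign ++ List.replicate (width.toNat - (sign.length + digs.length)) '0' ++ digs

-- ===== PORT A =====
-- "".join(lines) is ported as List.flatten on the char lists.
def emit_array (name : String) (ctype : String) (width : Int) (suffix : String) (vals : List Int) : String :=
  let header : List Char :=
    "static const ".toList ++ ctype.toList ++ " ".toList ++ name.toList ++ "[] = {\n".toList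
  let n : Int := (vals.length : Int)
  let lines : List (List Char) :=
    (PySem.List.pyRange 0 n 2).foldl (fun lines i =>
      if i + 1 < n then
        lines ++ ["  0x".toList ++ pvFmtHex (PySem.List.pyGetD vals i 0) width ++ suffix.toList
                  ++ ", 0x".toList ++ pvFmtHex (PySem.List.pyGetD vals (i + 1) 0) width ++ suffix.toList
                  ++ ",\n".toList]
      else
        lines ++ ["  0x".toList ++ pvFmtHex (PySem.List.pyGetD vals i 0) width ++ suffix.toList
                  ++ ",\n".toList]) [header]
  String.ofList (lines ++ ["};\n".toList]).flatten

-- ===== PORT B =====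
-- out += s on the Python string is ported as ++ on the char list.
def emit_array_alt (name : String) (ctype : String) (width : Int) (suffix : String) (vals : List Int) : String :=
  let out0 : List Char :=
    "static const ".toList ++ ctype.toList ++ " ".toList ++ name.toList ++ "[] = {\n".toList
  let out : List Char :=
    (PySem.List.enumerate vals).foldl (fun out iv =>
      let out := out ++ (if PySem.Int.mod iv.1 2 == 0 then "  ".toList else ", ".toList)
      let out := out ++ ("0x".toList ++ pvFmtHex iv.2 width ++ suffix.toList)
      if PySem.Int.mod iv.1 2 == 1 || iv.1 == (vals.length : Int) - 1 then
        out ++ ",\n".toList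
      else out) out0
  String.ofList (out ++ "};\n".toList)

-- ===== PRECONDITION & SPEC =====
-- Pre_ excludes exactly the inputs on which Python A raises ValueError: a negative format
-- width with a nonempty vals list (the format spec f"0{width}X" is then invalid).
def Pre_emit_array (name : String) (ctype : String) (width : Int) (suffix : String) (vals : List Int) : Prop :=
  vals = [] ∨ 0 ≤ width
instance (name : String) (ctype : String) (width : Int) (suffix : String) (vals : List Int) : Decidable (Pre_emit_array name ctype width suffix vals) := by unfold Pre_emit_array; infer_instance

def pvWitness_emit_array : String × String × Int × String × List Int := ("tab", "uint32_t", 4, "u", [1, 2, 3])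

def Spec_emit_array (name : String) (ctype : String) (width : Int) (suffix : String) (vals : List Int) (out : String) : Prop := out = emit_array_alt name ctype width suffix vals
instance (name : String) (ctype : String) (width : Int) (suffix : String) (vals : List Int) (out : String) : Decidable (Spec_emit_array name ctype width suffix vals out) := by unfold Spec_emit_array; infer_instance

-- ===== CLAIM (what is proved, stated in full; the proofs are below) =====
def Claim_equal_emit_array : Prop := ∀ (name : String) (ctype : String) (width : Int) (suffix : String) (vals : List Int), Dom_emit_array name ctype width suffix vals → Pre_emit_array name ctype width suffix vals → Spec_emit_array name ctype width suffix vals (emit_array name ctype width suffix vals)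

-- ===== LEMMAS AND PROOFS =====

-- the common recursive characterization: the body text, two values per line
def pvTok (width : Int) (suffix : String) (v : Int) : List Char :=
  "0x".toList ++ pvFmtHex v width ++ suffix.toList

def pvPairs (width : Int) (suffix : String) : List Int → List Char
  | [] => []
  | [a] => "  ".toList ++ pvTok width suffix a ++ ",\n".toList
  | a :: b :: t =>
      "  ".toList ++ pvTok width suffix a ++ ", ".toList ++ pvTok width suffix b ++ ",\n".toList
        ++ pvPairs width suffix t

-- A's line for index i
def pvLineA (width : Int) (suffix : String) (vals : List Int) (i : Int) : List Char :=
  if i + 1 < (vals.length : Int) then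
    "  0x".toList ++ pvFmtHex (PySem.List.pyGetD vals i 0) width ++ suffix.toList
      ++ ", 0x".toList ++ pvFmtHex (PySem.List.pyGetD vals (i + 1) 0) width ++ suffix.toList
      ++ ",\n".toList
  else
    "  0x".toList ++ pvFmtHex (PySem.List.pyGetD vals i 0) width ++ suffix.toList ++ ",\n".toList

-- B's contribution of one enumerate entry (L = len(vals))
def pvSegB (width : Int) (suffix : String) (L : Int) (iv : Int × Int) : List Char :=
  (if PySem.Int.mod iv.1 2 == 0 then "  ".toList else ", ".toList)
    ++ ("0x".toList ++ pvFmtHex iv.2 width ++ suffix.toList)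
    ++ (if PySem.Int.mod iv.1 2 == 1 || iv.1 == L - 1 then ",\n".toList else [])

theorem pvRange_step2_shift (m : Nat) :
    PySem.List.pyRange 0 ((m : Int) + 2) 2
      = 0 :: (PySem.List.pyRange 0 (m : Int) 2).map (· + 2) := by
  rw [PySem.List.pyRange_of_pos 0 ((m : Int) + 2) (by norm_num),
      PySem.List.pyRange_of_pos 0 (m : Int) (by norm_num)]
  have h1 : (if (0:Int) < (m : Int) + 2 then (((m:Int) + 2 - 0 + 2 - 1) / 2).toNat else 0)
      = (if (0:Int) < (m : Int) then (((m:Int) - 0 + 2 - 1) / 2).toNat else 0) + 1 := by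
    rcases Nat.eq_zero_or_pos m with h | h
    · subst h; decide
    · have hm : (0:Int) < (m:Int) := by exact_mod_cast h
      rw [if_pos (by omega), if_pos hm]
      omega
  rw [h1, List.range_succ_eq_map]
  simp only [List.map_cons, List.map_map, Nat.cast_zero, mul_zero, zero_add]
  congr 1

theorem pvGetD_cons_cons (a b : Int) (t : List Int) (j : Int) (hj : 0 ≤ j) :
    PySem.List.pyGetD (a :: b :: t) (j + 2) 0 = PySem.List.pyGetD t j 0 := by
  rw [PySem.List.pyGetD_of_nonneg _ _ (by omega), PySem.List.pyGetD_of_nonneg _ _ hj]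
  have : (j + 2).toNat = j.toNat + 1 + 1 := by omega
  rw [this, List.getD_cons_succ, List.getD_cons_succ]

-- A's body equals the recursive characterization
theorem pvA_eq_pairs (width : Int) (suffix : String) (vals : List Int) :
    ((PySem.List.pyRange 0 (vals.length : Int) 2).map (pvLineA width suffix vals)).flatten
      = pvPairs width suffix vals := by
  induction vals using pvPairs.induct with
  | case1 =>
      have h : PySem.List.pyRange 0 (((0:Nat) : Int)) 2 = [] := by decide
      simp only [List.length_nil] at h ⊢
      rw [h]
      simp [pvPairs]
  | case2 a =>
      have h : PySem.List.pyRange 0 (((1:Nat) : Int)) 2 = [0] := by decide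
      simp only [List.length_cons, List.length_nil] at h ⊢
      rw [h]
      simp [pvLineA, pvPairs, pvTok, PySem.List.pyGetD]
  | case3 a b t ih =>
      have hlen : (((a :: b :: t) : List Int).length : Int) = (t.length : Int) + 2 := by
        simp; omega
      rw [hlen, pvRange_step2_shift t.length]
      rw [List.map_cons, List.flatten_cons, List.map_map]
      have h0 : pvLineA width suffix (a :: b :: t) 0
          = "  ".toList ++ pvTok width suffix a ++ ", ".toList ++ pvTok width suffix b ++ ",\n".toList := by
        rw [pvLineA, if_pos (by rw [hlen]; omega)]
        simp [pvTok, PySem.List.pyGetD]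
      have hshift : ∀ j ∈ PySem.List.pyRange 0 (t.length : Int) 2,
          (pvLineA width suffix (a :: b :: t) ∘ (· + 2)) j = pvLineA width suffix t j := by
        intro j hj
        obtain ⟨hj0, hjn, -⟩ := (PySem.List.mem_pyRange_iff_of_pos (by norm_num) j).mp hj
        simp only [Function.comp]
        rw [pvLineA, pvLineA, hlen]
        rw [pvGetD_cons_cons a b t j hj0]
        have : j + 2 + 1 = (j + 1) + 2 := by ring
        rw [this, pvGetD_cons_cons a b t (j + 1) (by omega)]
        by_cases hc : j + 1 < (t.length : Int)
        · rw [if_pos (by omega), if_pos hc]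
        · rw [if_neg (by omega), if_neg hc]
      rw [List.map_congr_left hshift, ih, h0, pvPairs]

-- B's body equals the recursive characterization
theorem pvB_eq_pairs (width : Int) (suffix : String) :
    ∀ (vs : List Int) (k L : Int), k % 2 = 0 → k + (vs.length : Int) = L →
      (PySem.List.enumerate vs k).flatMap (pvSegB width suffix L) = pvPairs width suffix vs := by
  intro vs
  induction vs using pvPairs.induct with
  | case1 => intro k L _ _; simp [PySem.List.enumerate, pvPairs]
  | case2 a =>
      intro k L hk hL
      rw [PySem.List.enumerate_cons]
      have h0 : PySem.List.enumerate ([] : List Int) (k + 1) = [] := by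
        simp [PySem.List.enumerate]
      rw [h0]
      have hmod : PySem.Int.mod k 2 = k % 2 :=
        PySem.Int.mod_eq_emod_of_pos (a := k) (b := 2) (by norm_num)
      have hkL : k = L - 1 := by simp at hL; omega
      have h1 : (PySem.Int.mod k 2 == 0) = true := by rw [hmod]; simp [hk]
      have h2 : (PySem.Int.mod k 2 == 1 || k == L - 1) = true := by
        rw [hmod]
        simp [hkL]
      simp only [List.flatMap_cons, List.flatMap_nil, pvSegB, h1, h2]
      simp [pvPairs, pvTok]
  | case3 a b t ih =>
      intro k L hk hL
      rw [PySem.List.enumerate_cons, PySem.List.enumerate_cons]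
      simp only [List.flatMap_cons]
      have hlen : k + ((t.length : Int) + 2) = L := by simp at hL; omega
      have hmodk : PySem.Int.mod k 2 = k % 2 :=
        PySem.Int.mod_eq_emod_of_pos (a := k) (b := 2) (by norm_num)
      have hmodk1 : PySem.Int.mod (k + 1) 2 = (k + 1) % 2 :=
        PySem.Int.mod_eq_emod_of_pos (a := k + 1) (b := 2) (by norm_num)
      have hk1 : (k + 1) % 2 = 1 := by omega
      have hkne : (k == L - 1) = false := by
        apply beq_eq_false_iff_ne.mpr; omega
      have e1 : (PySem.Int.mod k 2 == 0) = true := by rw [hmodk]; simp [hk]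
      have e2 : (PySem.Int.mod k 2 == 1 || (k == L - 1)) = false := by
        rw [hmodk]
        simp [hk, hkne]
      have e3 : (PySem.Int.mod (k + 1) 2 == 0) = false := by rw [hmodk1]; simp [hk1]
      have e4 : (PySem.Int.mod (k + 1) 2 == 1 || ((k + 1) == L - 1)) = true := by
        rw [hmodk1]
        simp [hk1]
      have hseg1 : pvSegB width suffix L (k, a)
          = "  ".toList ++ pvTok width suffix a := by
        simp only [pvSegB, e1, e2]
        simp [pvTok]
      have hseg2 : pvSegB width suffix L (k + 1, b)
          = ", ".toList ++ pvTok width suffix b ++ ",\n".toList := by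
        simp only [pvSegB, e3, e4]
        simp [pvTok]
      rw [hseg1, hseg2, ih (k + 1 + 1) L (by omega) (by omega), pvPairs]
      simp [List.append_assoc]

-- ===== VERDICT (by name: the statement is the Claim_ definition above) =====
theorem emit_array_spec : Claim_equal_emit_array := by
  intro name ctype width suffix vals _ _
  unfold Spec_emit_array emit_array emit_array_alt
  dsimp only
  congr 1
  -- rewrite A's fold into [header] ++ map, B's fold into out0 ++ flatMap
  have hA : ∀ (init : List (List Char)),
      (PySem.List.pyRange 0 (vals.length : Int) 2).foldl (fun lines i =>
        if i + 1 < (vals.length : Int) then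
          lines ++ ["  0x".toList ++ pvFmtHex (PySem.List.pyGetD vals i 0) width ++ suffix.toList
                    ++ ", 0x".toList ++ pvFmtHex (PySem.List.pyGetD vals (i + 1) 0) width ++ suffix.toList
                    ++ ",\n".toList]
        else
          lines ++ ["  0x".toList ++ pvFmtHex (PySem.List.pyGetD vals i 0) width ++ suffix.toList
                    ++ ",\n".toList]) init
      = init ++ (PySem.List.pyRange 0 (vals.length : Int) 2).map (pvLineA width suffix vals) := by
    intro init
    rw [PySem.List.foldl_congr_mem _ _ (fun lines i => lines ++ [pvLineA width suffix vals i]) _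
        (by intro acc i _; simp only [pvLineA]; split_ifs <;> rfl)]
    exact PySem.List.foldl_append_singleton_eq_map _ _ _
  have hB :
      (PySem.List.enumerate vals).foldl (fun out iv =>
        let out := out ++ (if PySem.Int.mod iv.1 2 == 0 then "  ".toList else ", ".toList)
        let out := out ++ ("0x".toList ++ pvFmtHex iv.2 width ++ suffix.toList)
        if PySem.Int.mod iv.1 2 == 1 || iv.1 == (vals.length : Int) - 1 then
          out ++ ",\n".toList
        else out)
        ("static const ".toList ++ ctype.toList ++ " ".toList ++ name.toList ++ "[] = {\n".toList)
      = ("static const ".toList ++ ctype.toList ++ " ".toList ++ name.toList ++ "[] = {\n".toList)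
          ++ (PySem.List.enumerate vals).flatMap (pvSegB width suffix (vals.length : Int)) := by
    rw [PySem.List.foldl_congr_mem _ _ (fun out iv => out ++ pvSegB width suffix (vals.length : Int) iv) _
        (by intro acc iv _; simp only [pvSegB]; split_ifs <;> simp [List.append_assoc])]
    exact PySem.List.foldl_append_eq_flatMap _ _ _
  rw [hA, hB, pvB_eq_pairs width suffix vals 0 (vals.length : Int) (by norm_num) (by ring)]
  rw [← pvA_eq_pairs width suffix vals]
  simp [List.append_assoc]
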